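-- pv_equiv track=rewrite | github.com/shalfei/https---github.com-shalfei-logistics2025 | scoring.py | normalize_seq
-- ===== SOURCE A (Python) =====
-- WAREHOUSE_ID = 0
--
-- def normalize_seq(seq):
--     if not seq:
--         return []
--     s = list(seq)
--     while s and s[0] == WAREHOUSE_ID:
--         s.pop(0)
--     while s and s[-1] == WAREHOUSE_ID:
--         s.pop()
--     if WAREHOUSE_ID in s:
--         return None
--     return s
-- ===== SOURCE B (Python) =====
-- WAREHOUSE_ID = 0
--
-- def normalize_seq(seq):
--     if not seq:
--         return []
--     s = list(seq)
--     idx = [i for i, x in enumerate(s) if x != WAREHOUSE_ID]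
--     if not idx:
--         return []
--     first, last = idx[0], idx[-1]
--     if len(idx) != last - first + 1:
--         return None
--     return s[first:last + 1]
-- ===== Notes on version B (the rewrite author's own statement) =====
-- stated objective: alternative
-- what changed: Instead of popping zeros off both ends and rescanning the remainder for zeros, B collects the indices of all non-warehouse entries in one enumerate pass and decides by an arithmetic contiguity check (len(idx) == last - first + 1), returning the slice s[first:last+1].
import Mathlib
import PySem

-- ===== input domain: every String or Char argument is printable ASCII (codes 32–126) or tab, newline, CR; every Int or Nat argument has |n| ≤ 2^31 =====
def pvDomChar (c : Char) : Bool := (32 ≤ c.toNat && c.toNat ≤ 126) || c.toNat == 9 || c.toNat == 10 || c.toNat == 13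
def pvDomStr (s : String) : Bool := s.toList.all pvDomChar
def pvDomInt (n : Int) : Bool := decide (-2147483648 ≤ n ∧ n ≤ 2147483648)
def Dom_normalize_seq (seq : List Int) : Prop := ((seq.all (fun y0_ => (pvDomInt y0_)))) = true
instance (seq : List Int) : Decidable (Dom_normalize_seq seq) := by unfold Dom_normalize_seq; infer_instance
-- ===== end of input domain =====

-- B collects the indices of all non-warehouse entries in one enumerate pass and
-- decides "interior zero" by an arithmetic contiguity check (alternative decomposition,
-- no speed claim); A trims both ends and rescans the remainder.

-- ===== PORT A =====
-- while s and s[0] == WAREHOUSE_ID: s.pop(0)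
def trimHead : List Int → List Int
  | [] => []
  | x :: xs => if x = 0 then trimHead xs else x :: xs

-- while s and s[-1] == WAREHOUSE_ID: s.pop()
def trimTail (s : List Int) : List Int :=
  if h : s.getLast? = some 0 then trimTail s.dropLast else s
termination_by s.length
decreasing_by
  have hne : s ≠ [] := by intro e; simp [e] at h
  have := List.length_pos_iff.mpr hne
  simp [List.length_dropLast]; omega

def normalize_seq (seq : List Int) : Option (List Int) :=
  if seq = [] then some []            -- `if not seq: return []`
  else
    let s := trimTail (trimHead seq)
    if 0 ∈ s then none else some s    -- `if WAREHOUSE_ID in s: return None`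

-- ===== PORT B =====
-- [i for i, x in enumerate(s, k) if x != WAREHOUSE_ID]  (Source B uses k = 0)
def pvIdxs (s : List Int) (k : Int) : List Int :=
  ((PySem.List.enumerate s k).filter (fun p => p.2 != 0)).map (·.1)

def normalize_seq_alt (seq : List Int) : Option (List Int) :=
  if seq = [] then some []
  else
    match pvIdxs seq 0 with
    | [] => some []
    | f :: rest =>
      let l := (f :: rest).getLast (List.cons_ne_nil f rest)
      if ((f :: rest).length : Int) = l - f + 1 then
        some (PySem.List.slice seq (some f) (some (l + 1)))
      else none

-- ===== PRECONDITION & SPEC =====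
def Spec_normalize_seq (seq : List Int) (out : Option (List Int)) : Prop := out = normalize_seq_alt seq
instance (seq : List Int) (out : Option (List Int)) : Decidable (Spec_normalize_seq seq out) := by unfold Spec_normalize_seq; infer_instance

-- ===== CLAIM (what is proved, stated in full; the proofs are below) =====
def Claim_equal_normalize_seq : Prop := ∀ (seq : List Int), Dom_normalize_seq seq → Spec_normalize_seq seq (normalize_seq seq)

-- ===== LEMMAS AND PROOFS =====

theorem pvIdxs_nil (k : Int) : pvIdxs [] k = [] := by
  simp [pvIdxs, PySem.List.enumerate]

theorem pvIdxs_cons (x : Int) (t : List Int) (k : Int) :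
    pvIdxs (x :: t) k = if x = 0 then pvIdxs t (k + 1) else k :: pvIdxs t (k + 1) := by
  by_cases hx : x = 0 <;> simp [pvIdxs, PySem.List.enumerate_cons, hx]

theorem pvIdxs_append (u v : List Int) (k : Int) :
    pvIdxs (u ++ v) k = pvIdxs u k ++ pvIdxs v (k + u.length) := by
  simp [pvIdxs, PySem.List.enumerate_append]

theorem pvIdxs_shift (t : List Int) (k : Int) :
    pvIdxs t (k + 1) = (pvIdxs t k).map (· + 1) := by
  induction t generalizing k with
  | nil => simp [pvIdxs_nil]
  | cons x xs ih =>
    by_cases hx : x = 0 <;> simp [pvIdxs_cons, hx, ih (k + 1), ih k]  -- both IH instances needed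

theorem pvIdxs_bounds (s : List Int) (k : Int) :
    ∀ i ∈ pvIdxs s k, k ≤ i ∧ i < k + s.length := by
  intro i hi
  simp only [pvIdxs, List.mem_map, List.mem_filter] at hi
  obtain ⟨p, ⟨hp, _⟩, rfl⟩ := hi
  rw [PySem.List.mem_enumerate_iff] at hp
  obtain ⟨j, hj, rfl⟩ := hp
  refine ⟨by simp, by simp; omega⟩

theorem pvIdxs_length (s : List Int) (k : Int) :
    (pvIdxs s k).length = s.countP (fun x => x != 0) := by
  induction s generalizing k with
  | nil => simp [pvIdxs_nil]
  | cons x xs ih =>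
    by_cases hx : x = 0 <;> simp [pvIdxs_cons, hx, ih (k + 1)]

theorem trimTail_nil : trimTail [] = [] := by
  rw [trimTail]; simp

theorem trimHead_nonzero (x : Int) (t : List Int) (hx : x ≠ 0) :
    trimHead (x :: t) = x :: t := by simp [trimHead, hx]

theorem trimTail_concat_zero (u : List Int) :
    trimTail (u ++ [0]) = trimTail u := by
  rw [trimTail]
  simp

theorem trimTail_last_ne (s : List Int) (h : s.getLast? ≠ some 0) :
    trimTail s = s := by
  rw [trimTail]; simp [h]

theorem getLast_map_succ (f : Int) (rest : List Int) :
    ((f + 1) :: rest.map (· + 1)).getLast (List.cons_ne_nil _ _)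
      = (f :: rest).getLast (List.cons_ne_nil f rest) + 1 := by
  have h : (f + 1) :: rest.map (· + 1) = (f :: rest).map (· + 1) := rfl
  rw [List.getLast_congr _ (by simp) h]
  exact List.getLast_map (by simp)

theorem slice_cons_shift (a : Int) (t : List Int) (f l : Int) (hf : 0 ≤ f) (hl : 0 ≤ l) :
    PySem.List.slice (a :: t) (some (f + 1)) (some (l + 1 + 1))
      = PySem.List.slice t (some f) (some (l + 1)) := by
  rw [PySem.List.slice_toNat _ (by omega) (by omega),
      PySem.List.slice_toNat _ (by omega) (by omega)]
  rw [show (f + 1).toNat = f.toNat + 1 by omega, List.drop_succ_cons]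
  congr 1
  omega

theorem slice_append_of_le (u v : List Int) (f l : Int) (hf : 0 ≤ f) (hl : 0 ≤ l)
    (hfu : f ≤ (u.length : Int)) (hlu : l + 1 ≤ (u.length : Int)) :
    PySem.List.slice (u ++ v) (some f) (some (l + 1))
      = PySem.List.slice u (some f) (some (l + 1)) := by
  rw [PySem.List.slice_toNat _ (by omega) (by omega),
      PySem.List.slice_toNat _ (by omega) (by omega)]
  rw [List.drop_append_of_le_length (by omega)]
  rw [List.take_append_of_le_length (by simp; omega)]

theorem alt_of_idx_nil (s : List Int) (h : pvIdxs s 0 = []) :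
    normalize_seq_alt s = some [] := by
  cases s with
  | nil => rfl
  | cons a t =>
    simp only [normalize_seq_alt, if_neg (List.cons_ne_nil a t)]
    split
    · rfl
    · rename_i f rest heq
      rw [h] at heq; simp at heq

theorem alt_of_idx_cons (s : List Int) (f : Int) (rest : List Int) (hs : s ≠ [])
    (h : pvIdxs s 0 = f :: rest) :
    normalize_seq_alt s =
      if ((f :: rest).length : Int)
          = (f :: rest).getLast (List.cons_ne_nil f rest) - f + 1
      then some (PySem.List.slice s (some f)
             (some ((f :: rest).getLast (List.cons_ne_nil f rest) + 1)))
      else none := by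
  match s, hs with
  | a :: t, _ =>
    simp only [normalize_seq_alt, if_neg (List.cons_ne_nil a t)]
    split
    · rename_i heq; rw [h] at heq; simp at heq
    · rename_i f' rest' heq
      rw [h] at heq
      obtain ⟨rfl, rfl⟩ : f = f' ∧ rest = rest' := by
        injection heq with h1 h2; exact ⟨h1, h2⟩
      rfl

theorem main_eq (s : List Int) : normalize_seq s = normalize_seq_alt s := by
  suffices h : ∀ n (s : List Int), s.length ≤ n → normalize_seq s = normalize_seq_alt s by
    exact h s.length s le_rfl
  intro n
  induction n with
  | zero =>
    intro s hs
    have : s = [] := List.eq_nil_of_length_eq_zero (Nat.le_zero.mp hs)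
    subst this; rfl
  | succ n ih =>
    intro s hs
    match s with
    | [] => rfl
    | x :: t =>
      by_cases hx : x = 0
      · -- leading zero: both programs reduce to the tail
        subst hx
        have hA : normalize_seq (0 :: t) = normalize_seq t := by
          match t with
          | [] => simp [normalize_seq, trimHead, trimTail_nil]
          | y :: t' =>
            simp only [normalize_seq, if_neg (List.cons_ne_nil _ _)]
            have : trimHead (0 :: y :: t') = trimHead (y :: t') := by simp [trimHead]
            rw [this]
        have hidx : pvIdxs (0 :: t) 0 = (pvIdxs t 0).map (· + 1) := by
          rw [pvIdxs_cons, if_pos rfl]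
          simpa using pvIdxs_shift t 0
        have hB : normalize_seq_alt (0 :: t) = normalize_seq_alt t := by
          match ht : pvIdxs t 0 with
          | [] =>
            rw [alt_of_idx_nil _ (by rw [hidx, ht]; rfl), alt_of_idx_nil t ht]
          | f :: rest =>
            have htne : t ≠ [] := by
              intro e; subst e; rw [pvIdxs_nil] at ht; simp at ht
            have hfb := pvIdxs_bounds t 0 f (by rw [ht]; exact List.mem_cons_self)
            have hlb := pvIdxs_bounds t 0 _
              (by rw [ht]; exact List.getLast_mem (List.cons_ne_nil f rest))
            rw [alt_of_idx_cons (0 :: t) (f + 1) (rest.map (· + 1))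
                  (List.cons_ne_nil _ _) (by rw [hidx, ht]; rfl),
                alt_of_idx_cons t f rest htne ht]
            rw [getLast_map_succ]
            simp only [List.length_cons, List.length_map]
            by_cases hc : ((rest.length + 1 : Nat) : Int)
                = (f :: rest).getLast (List.cons_ne_nil f rest) - f + 1
            · rw [if_pos (by push_cast at hc ⊢; omega), if_pos hc]
              congr 1
              exact slice_cons_shift 0 t f _ hfb.1 hlb.1
            · rw [if_neg (by push_cast at hc ⊢; omega), if_neg hc]
        rw [hA, hB]
        exact ih t (by simp at hs; omega)
      · rcases (x :: t).eq_nil_or_concat with he | ⟨u, y, huy⟩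
        · exact absurd he (List.cons_ne_nil x t)
        rw [List.concat_eq_append] at huy
        by_cases hy : y = 0
        · -- trailing zero: both programs reduce to the front part u
          subst hy
          have hune : u ≠ [] := by
            intro e; subst e; simp at huy; exact hx huy.1
          obtain ⟨x', u', rfl⟩ : ∃ x' u', u = x' :: u' := by
            match u, hune with
            | a :: b, _ => exact ⟨a, b, rfl⟩
          have hx' : x' = x := by
            have := huy; simp at this; exact this.1.symm
          have hxne' : x' ≠ 0 := hx' ▸ hx
          have hA : normalize_seq (x :: t) = normalize_seq (x' :: u') := by
            simp only [normalize_seq, if_neg (List.cons_ne_nil _ _),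
              trimHead_nonzero x t hx, trimHead_nonzero x' u' hxne']
            rw [huy, trimTail_concat_zero]
          have hidx : pvIdxs (x :: t) 0 = pvIdxs (x' :: u') 0 := by
            rw [huy, pvIdxs_append]
            simp [pvIdxs_cons, pvIdxs_nil]
          have hcons : pvIdxs (x' :: u') 0 = 0 :: pvIdxs u' (0 + 1) := by
            rw [pvIdxs_cons, if_neg hxne']
          have hLmem : (0 :: pvIdxs u' (0 + 1)).getLast (List.cons_ne_nil _ _)
              ∈ pvIdxs (x' :: u') 0 := by
            rw [hcons]; exact List.getLast_mem _
          have hLb := pvIdxs_bounds (x' :: u') 0 _ hLmem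
          have hB : normalize_seq_alt (x :: t) = normalize_seq_alt (x' :: u') := by
            rw [alt_of_idx_cons (x :: t) 0 _ (List.cons_ne_nil x t) (hidx.trans hcons),
                alt_of_idx_cons (x' :: u') 0 _ (List.cons_ne_nil x' u') hcons]
            by_cases hc : ((0 :: pvIdxs u' (0 + 1)).length : Int)
                = (0 :: pvIdxs u' (0 + 1)).getLast (List.cons_ne_nil _ _) - 0 + 1
            · rw [if_pos hc, if_pos hc]
              congr 1
              rw [huy]
              exact slice_append_of_le (x' :: u') [0] 0 _ le_rfl hLb.1
                (by simp; omega) (by have := hLb.2; simp at this ⊢; omega)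
            · rw [if_neg hc, if_neg hc]
          rw [hA, hB]
          have hlt : (x' :: u').length ≤ n := by
            have : (x :: t).length = (x' :: u').length + 1 := by rw [huy]; simp
            omega
          exact ih _ hlt
        · -- head and last both nonzero: compute both sides on s itself
          have hA : normalize_seq (x :: t) =
              if 0 ∈ (x :: t) then none else some (x :: t) := by
            simp only [normalize_seq, if_neg (List.cons_ne_nil _ _),
              trimHead_nonzero x t hx]
            rw [trimTail_last_ne]
            rw [huy, List.getLast?_concat]
            simp [hy]
          have hcons : pvIdxs (x :: t) 0 = 0 :: pvIdxs t (0 + 1) := by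
            rw [pvIdxs_cons, if_neg hx]
          have hidx2 : pvIdxs (x :: t) 0 = pvIdxs u 0 ++ [(u.length : Int)] := by
            rw [huy, pvIdxs_append]
            simp [pvIdxs_cons, pvIdxs_nil, hy]
          have hlast : (0 :: pvIdxs t (0 + 1)).getLast (List.cons_ne_nil _ _)
              = (u.length : Int) := by
            rw [List.getLast_congr _ (by simp) (hcons.symm.trans hidx2)]
            exact List.getLast_concat
          have hlen : (0 :: pvIdxs t (0 + 1)).length
              = (x :: t).countP (fun z => z != 0) := by
            rw [← hcons, pvIdxs_length]
          have hlenst : (x :: t).length = u.length + 1 := by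
            have : (x :: t).length = (u ++ [y]).length := by rw [huy]
            simpa using this
          rw [alt_of_idx_cons (x :: t) 0 _ (List.cons_ne_nil x t) hcons, hA, hlast]
          by_cases hz : 0 ∈ (x :: t)
          · rw [if_pos hz, if_neg]
            intro hcontra
            have hcp : (x :: t).countP (fun z => z != 0) < (x :: t).length := by
              rcases Nat.lt_or_ge ((x :: t).countP (fun z => z != 0)) ((x :: t).length)
                with h | h
              · exact h
              · exfalso
                have heq : (x :: t).countP (fun z => z != 0) = (x :: t).length :=
                  Nat.le_antisymm List.countP_le_length h
                have := List.countP_eq_length.mp heq 0 hz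
                simp at this
            omega
          · rw [if_neg hz, if_pos]
            · congr 1
              rw [show ((u.length : Int) + 1) = ((u.length + 1 : Nat) : Int) by push_cast; ring,
                  show (0 : Int) = ((0 : Nat) : Int) from rfl, PySem.List.slice_natCast]
              rw [Nat.sub_zero, List.drop_zero, ← hlenst, List.take_length]
            · have : (x :: t).countP (fun z => z != 0) = (x :: t).length := by
                apply List.countP_eq_length.mpr
                intro a ha
                simp only [bne_iff_ne, ne_eq]
                intro e; subst e; exact hz ha
              omega

-- ===== VERDICT (by name: the statement is the Claim_ definition above) =====
theorem normalize_seq_spec : Claim_equal_normalize_seq := by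
  intro seq _
  unfold Spec_normalize_seq
  exact main_eq seq
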